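-- pv_equiv track=rewrite | github.com/masaosans/ComfyUI_Usage_Checker | usage_checker.py | detect_removable_directories
-- ===== SOURCE A (Python) =====
-- def detect_removable_directories(top_level_dirs, node_type_to_path, used_node_types):
--
--     dir_to_node_types = {}
--
--     for node_type, path in node_type_to_path.items():
--         dir_to_node_types.setdefault(path, set()).add(node_type)
--
--     removable = set()
--
--     for d in top_level_dirs:
--
--         node_types = dir_to_node_types.get(d, set())
--
--         if not node_types:
--             removable.add(d)
--             continue
--
--         if all(nt not in used_node_types for nt in node_types):
--             removable.add(d)
--
--     return removable
-- ===== SOURCE B (Python) =====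
-- def detect_removable_directories(top_level_dirs, node_type_to_path, used_node_types):
--     used_dirs = {path for node_type, path in node_type_to_path.items()
--                  if node_type in used_node_types}
--     return {d for d in top_level_dirs if d not in used_dirs}
-- ===== Notes on version B (the rewrite author's own statement) =====
-- stated objective: simpler
-- what changed: Instead of building a directory-to-node-types inverted index and scanning each directory's whole type set with all(), B makes one pass collecting the set of directories that own a used node type and returns the top-level dirs not in it; the empty-set special case disappears.
import Mathlib
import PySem

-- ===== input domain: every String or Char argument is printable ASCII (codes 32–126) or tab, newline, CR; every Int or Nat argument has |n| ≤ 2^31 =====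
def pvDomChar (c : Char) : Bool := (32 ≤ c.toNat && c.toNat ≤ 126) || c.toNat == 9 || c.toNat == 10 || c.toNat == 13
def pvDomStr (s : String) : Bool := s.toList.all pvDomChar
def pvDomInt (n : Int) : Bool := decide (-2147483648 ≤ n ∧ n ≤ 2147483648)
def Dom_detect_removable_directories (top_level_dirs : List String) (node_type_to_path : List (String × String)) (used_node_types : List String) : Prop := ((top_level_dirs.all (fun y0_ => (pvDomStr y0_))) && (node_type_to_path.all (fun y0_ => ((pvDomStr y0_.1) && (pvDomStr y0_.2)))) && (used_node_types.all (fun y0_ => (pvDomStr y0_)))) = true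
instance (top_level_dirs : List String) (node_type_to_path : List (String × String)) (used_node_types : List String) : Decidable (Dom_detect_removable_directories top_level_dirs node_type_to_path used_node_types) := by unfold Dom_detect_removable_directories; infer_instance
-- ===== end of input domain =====

-- B replaces A's directory→node-types inverted index and per-directory all() scan by one pass
-- collecting the set of directories owning a used node type, then one filtering pass (objective: simpler).

-- ===== PORT A =====
def detect_removable_directories (top_level_dirs : List String) (node_type_to_path : List (String × String)) (used_node_types : List String) : List String :=
  -- dict.setdefault(path, set()).add(node_type)  ≡  d[path] = d.get(path, set()) ∪ {node_type}  = Dict.modify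
  let dir_to_node_types : PySem.Dict String (PySem.Set String) :=
    (PySem.Dict.ofList node_type_to_path).items.foldl
      (fun dd p => dd.modify p.2 PySem.Set.empty (fun s => PySem.Set.add s p.1))
      PySem.Dict.empty
  top_level_dirs.foldl
    (fun removable d =>
      let node_types := dir_to_node_types.getD d PySem.Set.empty
      if node_types.isEmpty then PySem.Set.add removable d
      else if node_types.all (fun nt => !(used_node_types.contains nt)) then PySem.Set.add removable d
      else removable)
    PySem.Set.empty

-- ===== PORT B =====
def detect_removable_directories_alt (top_level_dirs : List String) (node_type_to_path : List (String × String)) (used_node_types : List String) : List String :=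
  let used_dirs : PySem.Set String :=
    (PySem.Dict.ofList node_type_to_path).items.foldl
      (fun s p => if used_node_types.contains p.1 then PySem.Set.add s p.2 else s)
      PySem.Set.empty
  top_level_dirs.foldl
    (fun out d => if used_dirs.contains d then out else PySem.Set.add out d)
    PySem.Set.empty

-- ===== PRECONDITION & SPEC =====
def Spec_detect_removable_directories (top_level_dirs : List String) (node_type_to_path : List (String × String)) (used_node_types : List String) (out : List String) : Prop := out = detect_removable_directories_alt top_level_dirs node_type_to_path used_node_types
instance (top_level_dirs : List String) (node_type_to_path : List (String × String)) (used_node_types : List String) (out : List String) : Decidable (Spec_detect_removable_directories top_level_dirs node_type_to_path used_node_types out) := by unfold Spec_detect_removable_directories; infer_instance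

-- ===== CLAIM (what is proved, stated in full; the proofs are below) =====
def Claim_equal_detect_removable_directories : Prop := ∀ (top_level_dirs : List String) (node_type_to_path : List (String × String)) (used_node_types : List String), Dom_detect_removable_directories top_level_dirs node_type_to_path used_node_types → Spec_detect_removable_directories top_level_dirs node_type_to_path used_node_types (detect_removable_directories top_level_dirs node_type_to_path used_node_types)

-- ===== LEMMAS AND PROOFS =====

/-- Membership in A's inverted index: `nt` is in the type-set of directory `d`
    iff it was there already or the pair `(nt, d)` occurs in the processed list. -/
lemma mem_groupFold (L : List (String × String)) (dd : PySem.Dict String (PySem.Set String)) (nt d : String) :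
    nt ∈ (L.foldl (fun dd p => dd.modify p.2 PySem.Set.empty (fun s => PySem.Set.add s p.1)) dd).getD d PySem.Set.empty
      ↔ nt ∈ dd.getD d PySem.Set.empty ∨ (nt, d) ∈ L := by
  induction L generalizing dd with
  | nil => simp
  | cons p rest ih =>
    rw [List.foldl_cons, ih, PySem.Dict.getD_modify, List.mem_cons]
    by_cases hd : d = p.2
    · rw [if_pos hd]
      subst hd
      rw [PySem.Set.mem_add]
      constructor
      · rintro ((h | h) | h)
        · exact Or.inl h
        · exact Or.inr (Or.inl (by rw [h]))
        · exact Or.inr (Or.inr h)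
      · rintro (h | (h | h))
        · exact Or.inl (Or.inl h)
        · exact Or.inl (Or.inr (congrArg Prod.fst h))
        · exact Or.inr h
    · rw [if_neg hd]
      constructor
      · rintro (h | h)
        · exact Or.inl h
        · exact Or.inr (Or.inr h)
      · rintro (h | (h | h))
        · exact Or.inl h
        · exact absurd (congrArg Prod.snd h) hd
        · exact Or.inr h

/-- Membership in B's `used_dirs` set. -/
lemma mem_usedFold (used : List String) (L : List (String × String)) (s0 : PySem.Set String) (d : String) :
    d ∈ L.foldl (fun s p => if used.contains p.1 then PySem.Set.add s p.2 else s) s0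
      ↔ d ∈ s0 ∨ ∃ nt, (nt, d) ∈ L ∧ nt ∈ used := by
  induction L generalizing s0 with
  | nil => simp
  | cons p rest ih =>
    rw [List.foldl_cons, ih]
    by_cases hu : used.contains p.1 = true
    · rw [if_pos hu]
      rw [PySem.Set.mem_add]
      constructor
      · rintro ((h | h) | ⟨nt, hm, hn⟩)
        · exact Or.inl h
        · exact Or.inr ⟨p.1, List.mem_cons.mpr (Or.inl (by rw [h])), List.contains_iff_mem.mp hu⟩
        · exact Or.inr ⟨nt, List.mem_cons.mpr (Or.inr hm), hn⟩
      · rintro (h | ⟨nt, hm, hn⟩)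
        · exact Or.inl (Or.inl h)
        · rcases List.mem_cons.mp hm with hm | hm
          · exact Or.inl (Or.inr (congrArg Prod.snd hm))
          · exact Or.inr ⟨nt, hm, hn⟩
    · rw [if_neg hu]
      constructor
      · rintro (h | ⟨nt, hm, hn⟩)
        · exact Or.inl h
        · exact Or.inr ⟨nt, List.mem_cons.mpr (Or.inr hm), hn⟩
      · rintro (h | ⟨nt, hm, hn⟩)
        · exact Or.inl h
        · rcases List.mem_cons.mp hm with hm | hm
          · exact absurd (List.contains_iff_mem.mpr ((congrArg Prod.fst hm) ▸ hn)) hu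
          · exact Or.inr ⟨nt, hm, hn⟩

theorem detect_removable_directories_spec : Claim_equal_detect_removable_directories := by
  intro top_level_dirs node_type_to_path used_node_types _
  unfold Spec_detect_removable_directories detect_removable_directories detect_removable_directories_alt
  set L := (PySem.Dict.ofList node_type_to_path).items with hL
  dsimp only
  apply List.foldl_ext
  intro s d _
  have hgrp : ∀ nt, nt ∈ (L.foldl (fun dd p => dd.modify p.2 PySem.Set.empty (fun s => PySem.Set.add s p.1)) PySem.Dict.empty).getD d PySem.Set.empty ↔ (nt, d) ∈ L := by
    intro nt
    simpa using mem_groupFold L PySem.Dict.empty nt d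
  have hused : d ∈ (L.foldl (fun s p => if used_node_types.contains p.1 then PySem.Set.add s p.2 else s) PySem.Set.empty) ↔ ∃ nt, (nt, d) ∈ L ∧ nt ∈ used_node_types := by
    simpa using mem_usedFold used_node_types L PySem.Set.empty d
  show (let node_types := (L.foldl (fun dd p => dd.modify p.2 PySem.Set.empty (fun s => PySem.Set.add s p.1)) PySem.Dict.empty).getD d PySem.Set.empty
        if node_types.isEmpty then PySem.Set.add s d
        else if node_types.all (fun nt => !(used_node_types.contains nt)) then PySem.Set.add s d
        else s)
      = (if (L.foldl (fun s p => if used_node_types.contains p.1 then PySem.Set.add s p.2 else s) PySem.Set.empty).contains d then s else PySem.Set.add s d)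
  simp only []
  by_cases hmem : ∃ nt, (nt, d) ∈ L ∧ nt ∈ used_node_types
  · -- B excludes d; A's set for d is nonempty and its all() fails
    rcases hmem with ⟨nt, hntL, hntU⟩
    have hcont : (L.foldl (fun s p => if used_node_types.contains p.1 then PySem.Set.add s p.2 else s) PySem.Set.empty).contains d = true :=
      (PySem.Set.contains_iff _ _).mpr (hused.mpr ⟨nt, hntL, hntU⟩)
    rw [hcont, if_pos rfl]
    have hin : nt ∈ (L.foldl (fun dd p => dd.modify p.2 PySem.Set.empty (fun s => PySem.Set.add s p.1)) PySem.Dict.empty).getD d PySem.Set.empty := (hgrp nt).mpr hntL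
    have hne : ((L.foldl (fun dd p => dd.modify p.2 PySem.Set.empty (fun s => PySem.Set.add s p.1)) PySem.Dict.empty).getD d PySem.Set.empty).isEmpty = false := by
      rcases h : (L.foldl (fun dd p => dd.modify p.2 PySem.Set.empty (fun s => PySem.Set.add s p.1)) PySem.Dict.empty).getD d PySem.Set.empty with _ | _
      · rw [h] at hin; simp at hin
      · rw [h]; rfl
    rw [hne, if_neg (by simp)]
    have hall : ((L.foldl (fun dd p => dd.modify p.2 PySem.Set.empty (fun s => PySem.Set.add s p.1)) PySem.Dict.empty).getD d PySem.Set.empty).all (fun nt => !(used_node_types.contains nt)) = false := by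
      rw [List.all_eq_false]
      exact ⟨nt, hin, by simp [hntU]⟩
    rw [hall, if_neg (by simp)]
  · -- B keeps d; A adds it (the empty branch or the all() branch)
    have hcont : (L.foldl (fun s p => if used_node_types.contains p.1 then PySem.Set.add s p.2 else s) PySem.Set.empty).contains d = false := by
      rw [Bool.eq_false_iff]
      intro hc
      exact hmem (hused.mp ((PySem.Set.contains_iff _ _).mp hc))
    rw [hcont]
    by_cases he : ((L.foldl (fun dd p => dd.modify p.2 PySem.Set.empty (fun s => PySem.Set.add s p.1)) PySem.Dict.empty).getD d PySem.Set.empty).isEmpty = true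
    · rw [if_pos he, if_neg (show ¬(false = true) by simp)]
    · rw [if_neg he]
      have hall : ((L.foldl (fun dd p => dd.modify p.2 PySem.Set.empty (fun s => PySem.Set.add s p.1)) PySem.Dict.empty).getD d PySem.Set.empty).all (fun nt => !(used_node_types.contains nt)) = true := by
        rw [List.all_eq_true]
        intro nt hin
        rw [Bool.not_eq_eq_eq_not, Bool.not_true, Bool.eq_false_iff]
        intro hc
        exact hmem ⟨nt, (hgrp nt).mp hin, List.contains_iff_mem.mp hc⟩
      rw [hall, if_pos rfl, if_neg (show ¬(false = true) by simp)]
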